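-- pv_equiv track=rewrite | github.com/AKSAKS24/DB_RULE_2877717 | app/app2.py | iter_statements_with_offsets
-- ===== SOURCE A (Python) =====
-- def iter_statements_with_offsets(src: str):
--     buf = []
--     start = 0
--     for i, ch in enumerate(src):
--         buf.append(ch)
--         if ch == ".":
--             yield "".join(buf), start, i + 1
--             buf = []
--             start = i + 1
--     if buf:
--         yield "".join(buf), start, len(src)
-- ===== SOURCE B (Python) =====
-- def iter_statements_with_offsets(src: str):
--     start = 0
--     n = len(src)
--     while start < n:
--         idx = src.find(".", start)
--         if idx == -1:
--             yield src[start:], start, n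
--             break
--         yield src[start:idx + 1], start, idx + 1
--         start = idx + 1
-- ===== Notes on version B (the rewrite author's own statement) =====
-- stated objective: faster
-- what changed: Replaces the per-character buffer/flush loop with a while loop that jumps from period to period via str.find and slices each statement out directly.
import Mathlib
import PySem

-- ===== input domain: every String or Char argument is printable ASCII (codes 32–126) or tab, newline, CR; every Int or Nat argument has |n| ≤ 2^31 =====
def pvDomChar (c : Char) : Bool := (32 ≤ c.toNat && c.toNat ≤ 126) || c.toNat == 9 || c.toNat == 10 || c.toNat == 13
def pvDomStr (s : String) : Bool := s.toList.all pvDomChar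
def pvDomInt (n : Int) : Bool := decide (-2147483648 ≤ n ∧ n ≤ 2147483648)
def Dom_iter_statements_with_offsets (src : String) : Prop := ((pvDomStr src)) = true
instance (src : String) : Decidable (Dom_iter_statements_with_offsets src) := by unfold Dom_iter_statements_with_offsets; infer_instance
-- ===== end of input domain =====

-- B jumps from period to period (find) and slices, instead of A's
-- per-character buffer/flush loop. Both ports work on src.toList; A's generator is ported as the
-- list of its yields.

-- ===== PORT A =====
-- the for-loop of A: cs = remaining chars, i = current index, buf = chars collected since `start`
def pvGoA (cs : List Char) (i : Int) (buf : List Char) (start : Int) (n : Int) :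
    List (String × Int × Int) :=
  match cs with
  | [] => if buf ≠ [] then [(String.ofList buf, start, n)] else []
  | c :: rest =>
      if c = '.' then
        (String.ofList (buf ++ [c]), start, i + 1) :: pvGoA rest (i + 1) [] (i + 1) n
      else
        pvGoA rest (i + 1) (buf ++ [c]) start n

def iter_statements_with_offsets (src : String) : List (String × Int × Int) :=
  pvGoA src.toList 0 [] 0 (src.toList.length : Int)

-- ===== PORT B =====
-- the while-loop of B: rest = src[start:]; src.find('.', start) is findIdx? on rest (none = -1);
-- the slices src[start:idx+1] / src[start:] are take/whole of rest — exact on this suffix.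
def pvGoB (rest : List Char) (start : Int) (n : Int) : List (String × Int × Int) :=
  match h : rest.findIdx? (· = '.') with
  | none => if rest ≠ [] then [(String.ofList rest, start, n)] else []
  | some j =>
      (String.ofList (rest.take (j + 1)), start, start + (j : Int) + 1)
        :: pvGoB (rest.drop (j + 1)) (start + (j : Int) + 1) n
  termination_by rest.length
  decreasing_by
    have hj : j < rest.length := List.findIdx?_eq_some_iff_findIdx_eq.mp h |>.1
    simp [List.length_drop]; omega

def iter_statements_with_offsets_alt (src : String) : List (String × Int × Int) :=
  pvGoB src.toList 0 (src.toList.length : Int)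

-- ===== PRECONDITION & SPEC =====
def Spec_iter_statements_with_offsets (src : String) (out : List (String × Int × Int)) : Prop := out = iter_statements_with_offsets_alt src
instance (src : String) (out : List (String × Int × Int)) : Decidable (Spec_iter_statements_with_offsets src out) := by unfold Spec_iter_statements_with_offsets; infer_instance

-- ===== CLAIM (what is proved, stated in full; the proofs are below) =====
def Claim_equal_iter_statements_with_offsets : Prop := ∀ (src : String), Dom_iter_statements_with_offsets src → Spec_iter_statements_with_offsets src (iter_statements_with_offsets src)

-- ===== LEMMAS AND PROOFS =====

-- invariant: A's loop with a dot-free buffer behaves like B's loop on buf ++ cs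
theorem pvGoA_eq_goB (cs buf : List Char) (start n : Int)
    (hbuf : ∀ c ∈ buf, c ≠ '.') :
    pvGoA cs (start + (buf.length : Int)) buf start n = pvGoB (buf ++ cs) start n := by
  induction cs generalizing buf start with
  | nil =>
      have hfind : (buf ++ ([] : List Char)).findIdx? (· = '.') = none := by
        simp [List.findIdx?_eq_none_iff]
        intro c hc; exact hbuf c hc
      rw [pvGoB]
      split
      · simp [pvGoA]
      · rename_i j h1
        rw [hfind] at h1; cases h1
  | cons c rest ih =>
      by_cases hc : c = '.'
      · subst hc
        have hfind : (buf ++ '.' :: rest).findIdx? (· = '.') = some buf.length := by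
          rw [List.findIdx?_append]
          have h1 : buf.findIdx? (· = '.') = none := by
            simp [List.findIdx?_eq_none_iff]
            intro x hx; exact hbuf x hx
          simp [h1, List.findIdx?_cons]
        rw [pvGoB]
        split
        · rename_i h1; rw [hfind] at h1; cases h1
        · rename_i j h1
          rw [hfind] at h1
          cases h1
          have htake : (buf ++ '.' :: rest).take (buf.length + 1) = buf ++ ['.'] := by
            simp [List.take_append]
          have hdrop : (buf ++ '.' :: rest).drop (buf.length + 1) = rest := by
            simp [List.drop_append]
          rw [htake, hdrop]
          have ih0 := ih [] (start + (buf.length : Int) + 1) (by simp)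
          simp only [List.length_nil, Int.natCast_zero, add_zero, List.nil_append] at ih0
          simp [pvGoA, ih0]
      · have hbuf' : ∀ x ∈ buf ++ [c], x ≠ '.' := by
          intro x hx
          rcases List.mem_append.mp hx with h | h
          · exact hbuf x h
          · simp at h; subst h; exact hc
        have ih1 := ih (buf ++ [c]) start hbuf'
        rw [List.append_assoc, List.singleton_append] at ih1
        have e : start + (((buf ++ [c]).length : Nat) : Int) = start + (buf.length : Int) + 1 := by
          push_cast [List.length_append, List.length_cons, List.length_nil]; ring
        rw [e] at ih1
        simpa [pvGoA, hc] using ih1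

-- ===== VERDICT (by name: the statement is the Claim_ definition above) =====
theorem iter_statements_with_offsets_spec : Claim_equal_iter_statements_with_offsets := by
  intro src _
  unfold Spec_iter_statements_with_offsets iter_statements_with_offsets iter_statements_with_offsets_alt
  have h := pvGoA_eq_goB src.toList [] 0 (src.toList.length : Int) (by simp)
  simpa using h
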